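-- pv_equiv track=rewrite | github.com/ManyueJavvadi/kp-astro | backend/app/services/muhurtha_engine.py | _score_significations
-- ===== SOURCE A (Python) =====
-- EVENT_HOUSE_GROUPS = {
--     "marriage":      {"primary": 7,  "supporting": [2, 11, 5],  "denial": [1, 6, 10]},
--     "business":      {"primary": 10, "supporting": [2, 6, 11],  "denial": [5, 12]},
--     "house_warming": {"primary": 4,  "supporting": [11, 2],     "denial": [3, 10, 8]},
--     "travel":        {"primary": 9,  "supporting": [3, 12],     "denial": [2, 8]},
--     "education":     {"primary": 4,  "supporting": [9, 11],     "denial": [3, 12]},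
--     "vehicle":       {"primary": 4,  "supporting": [3, 11],     "denial": [8, 12]},
--     "medical":       {"primary": 1,  "supporting": [5, 11],     "denial": [6, 8, 12]},
--     "legal":         {"primary": 6,  "supporting": [11, 3],     "denial": [5, 12]},
--     "investment":    {"primary": 2,  "supporting": [5, 11],     "denial": [8, 12]},
--     "general":       {"primary": 1,  "supporting": [2, 11],     "denial": [6, 8, 12]},
-- }
--
-- def _score_significations(signified: list, event_type: str) -> int:
--     """Score from Lagna CSL house significations."""
--     group = EVENT_HOUSE_GROUPS.get(event_type, EVENT_HOUSE_GROUPS["general"])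
--     score = 0
--     if group["primary"] in signified:
--         score += 40
--     supporting_hits = sum(1 for h in group["supporting"] if h in signified)
--     score += min(supporting_hits, 2) * 15   # max 2 supporting houses count
--     if not any(h in signified for h in group["denial"]):
--         score += 20
--     return score
-- ===== SOURCE B (Python) =====
-- EVENT_HOUSE_GROUPS = {
--     "marriage":      {"primary": 7,  "supporting": [2, 11, 5],  "denial": [1, 6, 10]},
--     "business":      {"primary": 10, "supporting": [2, 6, 11],  "denial": [5, 12]},
--     "house_warming": {"primary": 4,  "supporting": [11, 2],     "denial": [3, 10, 8]},
--     "travel":        {"primary": 9,  "supporting": [3, 12],     "denial": [2, 8]},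
--     "education":     {"primary": 4,  "supporting": [9, 11],     "denial": [3, 12]},
--     "vehicle":       {"primary": 4,  "supporting": [3, 11],     "denial": [8, 12]},
--     "medical":       {"primary": 1,  "supporting": [5, 11],     "denial": [6, 8, 12]},
--     "legal":         {"primary": 6,  "supporting": [11, 3],     "denial": [5, 12]},
--     "investment":    {"primary": 2,  "supporting": [5, 11],     "denial": [8, 12]},
--     "general":       {"primary": 1,  "supporting": [2, 11],     "denial": [6, 8, 12]},
-- }
--
-- def _score_significations(signified: list, event_type: str) -> int:
--     """Score from Lagna CSL house significations (single pass over the distinct houses)."""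
--     group = EVENT_HOUSE_GROUPS.get(event_type, EVENT_HOUSE_GROUPS["general"])
--     primary = group["primary"]
--     supporting = set(group["supporting"])
--     denial = set(group["denial"])
--     primary_seen = False
--     sup_count = 0
--     denial_seen = False
--     for h in set(signified):
--         if h == primary:
--             primary_seen = True
--         if h in supporting:
--             sup_count += 1
--         if h in denial:
--             denial_seen = True
--     score = 40 if primary_seen else 0
--     score += min(sup_count, 2) * 15
--     if not denial_seen:
--         score += 20
--     return score
-- ===== Notes on version B (the rewrite author's own statement) =====
-- stated objective: alternative
-- what changed: Instead of three separate membership passes over the group's primary/supporting/denial lists against the signified list, B makes one pass over the distinct signified houses with set lookups, accumulating a primary flag, a distinct-supporting counter and a denial flag, then combines them.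
import Mathlib
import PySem

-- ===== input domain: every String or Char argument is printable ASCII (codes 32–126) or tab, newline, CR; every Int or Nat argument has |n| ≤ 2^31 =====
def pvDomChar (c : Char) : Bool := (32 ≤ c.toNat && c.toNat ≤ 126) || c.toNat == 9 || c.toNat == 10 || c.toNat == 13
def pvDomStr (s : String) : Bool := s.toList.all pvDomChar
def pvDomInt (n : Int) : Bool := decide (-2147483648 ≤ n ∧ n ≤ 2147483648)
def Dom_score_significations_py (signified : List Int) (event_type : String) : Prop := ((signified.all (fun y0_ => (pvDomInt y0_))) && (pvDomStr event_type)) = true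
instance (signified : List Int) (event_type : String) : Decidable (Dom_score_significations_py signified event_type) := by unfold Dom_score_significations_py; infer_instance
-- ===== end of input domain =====

-- ===== PORT A =====
-- B changes only the traversal (one pass over distinct signified houses instead of
-- passes over the group's lists); equal return value proved below (objective: alternative).

-- shared module constant EVENT_HOUSE_GROUPS: name -> (primary, supporting, denial)
def eventHouseGroups : PySem.Dict String (Int × List Int × List Int) :=
  PySem.Dict.ofList [
    ("marriage",      (7,  [2, 11, 5], [1, 6, 10])),
    ("business",      (10, [2, 6, 11], [5, 12])),
    ("house_warming", (4,  [11, 2],    [3, 10, 8])),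
    ("travel",        (9,  [3, 12],    [2, 8])),
    ("education",     (4,  [9, 11],    [3, 12])),
    ("vehicle",       (4,  [3, 11],    [8, 12])),
    ("medical",       (1,  [5, 11],    [6, 8, 12])),
    ("legal",         (6,  [11, 3],    [5, 12])),
    ("investment",    (2,  [5, 11],    [8, 12])),
    ("general",       (1,  [2, 11],    [6, 8, 12]))]

def score_significations_py (signified : List Int) (event_type : String) : Int :=
  let group := PySem.Dict.getD eventHouseGroups event_type
      (PySem.Dict.getD eventHouseGroups "general" (0, [], []))
  let score : Int := 0
  let score := if group.1 ∈ signified then score + 40 else score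
  let supporting_hits : Int :=
    group.2.1.foldl (fun acc h => if h ∈ signified then acc + 1 else acc) 0
  let score := score + min supporting_hits 2 * 15
  let score := if ¬ (group.2.2.any (fun h => decide (h ∈ signified))) then score + 20 else score
  score

-- ===== PORT B =====
def score_significations_py_alt (signified : List Int) (event_type : String) : Int :=
  let group := PySem.Dict.getD eventHouseGroups event_type
      (PySem.Dict.getD eventHouseGroups "general" (0, [], []))
  let primary := group.1
  let supporting : PySem.Set Int := PySem.Set.ofList group.2.1
  let denial : PySem.Set Int := PySem.Set.ofList group.2.2
  -- one pass over set(signified); the result is order-independent (flags and a count)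
  let st := (PySem.Set.ofList signified).foldl
      (fun (st : Bool × Int × Bool) h =>
        (st.1 || (h == primary),
         st.2.1 + (if PySem.Set.contains supporting h then 1 else 0),
         st.2.2 || PySem.Set.contains denial h))
      (false, 0, false)
  (if st.1 then (40 : Int) else 0) + min st.2.1 2 * 15 + (if !st.2.2 then 20 else 0)

-- ===== PRECONDITION & SPEC =====
def Spec_score_significations_py (signified : List Int) (event_type : String) (out : Int) : Prop := out = score_significations_py_alt signified event_type
instance (signified : List Int) (event_type : String) (out : Int) : Decidable (Spec_score_significations_py signified event_type out) := by unfold Spec_score_significations_py; infer_instance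

-- ===== CLAIM (what is proved, stated in full; the proofs are below) =====
def Claim_equal_score_significations_py : Prop := ∀ (signified : List Int) (event_type : String), Dom_score_significations_py signified event_type → Spec_score_significations_py signified event_type (score_significations_py signified event_type)

-- ===== LEMMAS AND PROOFS =====

-- every supporting list in the table (and the "general" default) has no duplicates
theorem sup_nodup (et : String) :
    (PySem.Dict.getD eventHouseGroups et
      (PySem.Dict.getD eventHouseGroups "general" (0, [], []))).2.1.Nodup := by
  rw [PySem.Dict.getD_eq_get?_getD]
  cases hv : PySem.Dict.get? eventHouseGroups et with
  | none => simp only [Option.getD_none]; decide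
  | some v =>
    simp only [Option.getD_some]
    have hmem := PySem.Dict.mem_items_of_get?_eq_some _ (h := hv)
    have hall : eventHouseGroups.items.all (fun p => decide p.2.2.1.Nodup) = true := by decide
    simpa using List.all_eq_true.mp hall _ hmem

-- B's one-pass fold computes: primary-seen flag, count of houses in `sup`, denial-seen flag
theorem fold_char (l : List Int) (p : Int) (sup den : List Int) (b : Bool) (c : Int) (d : Bool) :
    l.foldl
      (fun (st : Bool × Int × Bool) h =>
        (st.1 || (h == p),
         st.2.1 + (if PySem.Set.contains sup h then 1 else 0),
         st.2.2 || PySem.Set.contains den h))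
      (b, c, d)
    = (b || l.any (· == p),
       c + (l.countP (fun h => PySem.Set.contains sup h) : Int),
       d || l.any (fun h => PySem.Set.contains den h)) := by
  induction l generalizing b c d with
  | nil => simp
  | cons x xs ih =>
    simp only [List.foldl_cons, ih, List.any_cons, List.countP_cons, Prod.mk.injEq]
    refine ⟨by simp [Bool.or_assoc], ?_, by simp [Bool.or_assoc]⟩
    split_ifs <;> push_cast <;> ring

-- counting distinct common members read off either of two nodup lists
theorem countP_mem_comm (a b : List Int) (ha : a.Nodup) (hb : b.Nodup) :
    a.countP (fun h => decide (h ∈ b)) = b.countP (fun h => decide (h ∈ a)) := by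
  classical
  rw [List.countP_eq_length_filter, List.countP_eq_length_filter,
      ← List.toFinset_card_of_nodup (ha.filter _),
      ← List.toFinset_card_of_nodup (hb.filter _)]
  congr 1
  apply Finset.ext
  intro x
  simp [and_comm]

theorem any_eq_mem (sig : List Int) (p : Int) :
    ((PySem.Set.ofList sig).any (· == p)) = decide (p ∈ sig) := by
  rw [Bool.eq_iff_iff]
  simp only [List.any_eq_true, PySem.Set.mem_ofList, beq_iff_eq, decide_eq_true_eq]
  constructor
  · rintro ⟨x, hx, rfl⟩; exact hx
  · intro h; exact ⟨p, h, rfl⟩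

theorem any_den_comm (sig den : List Int) :
    ((PySem.Set.ofList sig).any (fun h => PySem.Set.contains den h))
      = (den.any (fun h => decide (h ∈ sig))) := by
  rw [Bool.eq_iff_iff]
  simp only [List.any_eq_true, PySem.Set.contains_iff, PySem.Set.mem_ofList, decide_eq_true_eq]
  constructor <;> rintro ⟨x, h1, h2⟩ <;> exact ⟨x, h2, h1⟩

-- B's count of distinct signified houses lying in `sup` = A's scan over `sup`
theorem count_eq (sig sup : List Int) (hs : sup.Nodup) :
    ((PySem.Set.ofList sig).countP (fun h => PySem.Set.contains (PySem.Set.ofList sup) h) : Int)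
      = sup.foldl (fun acc h => if h ∈ sig then acc + 1 else acc) (0 : Int) := by
  have h1 : (PySem.Set.ofList sig).countP (fun h => PySem.Set.contains (PySem.Set.ofList sup) h)
      = (PySem.Set.ofList sig).countP (fun h => decide (h ∈ sup)) := by
    apply List.countP_congr
    intro x _
    rw [Bool.eq_iff_iff]
    simp [PySem.Set.mem_ofList]
  have h2 : (PySem.Set.ofList sig).countP (fun h => decide (h ∈ sup))
      = sup.countP (fun h => decide (h ∈ sig)) := by
    rw [countP_mem_comm _ _ (PySem.Set.nodup_ofList sig) hs]
    apply List.countP_congr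
    intro x _
    rw [Bool.eq_iff_iff]
    simp [PySem.Set.mem_ofList]
  rw [h1, h2]
  simpa using (PySem.List.foldl_count_if (fun h => decide (h ∈ sig)) sup 0).symm

theorem main_eq (signified : List Int) (event_type : String) :
    score_significations_py signified event_type
      = score_significations_py_alt signified event_type := by
  unfold score_significations_py score_significations_py_alt
  simp only [fold_char]
  have hs := sup_nodup event_type
  rw [← count_eq signified _ hs, any_eq_mem, any_den_comm]
  by_cases h1 : (PySem.Dict.getD eventHouseGroups event_type
      (PySem.Dict.getD eventHouseGroups "general" (0, [], []))).1 ∈ signified <;>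
    by_cases h2 : ((PySem.Dict.getD eventHouseGroups event_type
      (PySem.Dict.getD eventHouseGroups "general" (0, [], []))).2.2.any
        (fun h => decide (h ∈ signified))) = true <;>
    simp [h1, h2] <;> simpa using h2

-- ===== VERDICT (by name: the statement is the Claim_ definition above) =====
theorem score_significations_py_spec : Claim_equal_score_significations_py := by
  intro signified event_type _
  exact main_eq signified event_type
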